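-- pv_equiv track=rewrite | github.com/pypi-data/pypi-mirror-392 | packages/kaygraph/kaygraph-0.3.2.tar.gz/kaygraph-0.3.2/workbooks/10-code-development/kaygraph-code-generator/utils/code_validator.py | _fix_missing_colons_python
-- ===== SOURCE A (Python) =====
-- def _fix_missing_colons_python(code: str) -> str:
--     """Fix missing colons in Python code."""
--     lines = code.split('\n')
--     fixed_lines = []
--
--     keywords = ['def', 'class', 'if', 'elif', 'else', 'for', 'while', 'try', 'except', 'finally', 'with']
--
--     for line in lines:
--         stripped = line.strip()
--         needs_colon = False
--
--         # Check if line starts with keyword and doesn't end with colon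
--         for keyword in keywords:
--             if stripped.startswith(keyword + ' ') or stripped == keyword:
--                 if not stripped.endswith(':'):
--                     needs_colon = True
--                     break
--
--         if needs_colon:
--             fixed_lines.append(line + ':')
--         else:
--             fixed_lines.append(line)
--
--     return '\n'.join(fixed_lines)
-- ===== SOURCE B (Python) =====
-- _KEYWORDS = {'def', 'class', 'if', 'elif', 'else', 'for', 'while',
--              'try', 'except', 'finally', 'with'}
--
--
-- def _flush(buf):
--     line = ''.join(buf)
--     stripped = line.strip()
--     if stripped.split(' ')[0] in _KEYWORDS and not stripped.endswith(':'):
--         return line + ':'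
--     return line
--
--
-- def _fix_missing_colons_python(code: str) -> str:
--     """Fix missing colons in Python code."""
--     out = []
--     buf = []
--     for ch in code:
--         if ch == '\n':
--             out.append(_flush(buf))
--             out.append('\n')
--             buf = []
--         else:
--             buf.append(ch)
--     out.append(_flush(buf))
--     return ''.join(out)
-- ===== Notes on version B (the rewrite author's own statement) =====
-- stated objective: alternative
-- what changed: Replaces split-into-lines + per-line nested scan over the 11 keywords + list-accumulate + join by a single character-level streaming pass over the whole string with an explicit line buffer, flushed at each newline; at a flush the colon decision is one first-token extraction plus one set-membership test instead of A's per-keyword startswith/equality loop.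
import Mathlib
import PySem

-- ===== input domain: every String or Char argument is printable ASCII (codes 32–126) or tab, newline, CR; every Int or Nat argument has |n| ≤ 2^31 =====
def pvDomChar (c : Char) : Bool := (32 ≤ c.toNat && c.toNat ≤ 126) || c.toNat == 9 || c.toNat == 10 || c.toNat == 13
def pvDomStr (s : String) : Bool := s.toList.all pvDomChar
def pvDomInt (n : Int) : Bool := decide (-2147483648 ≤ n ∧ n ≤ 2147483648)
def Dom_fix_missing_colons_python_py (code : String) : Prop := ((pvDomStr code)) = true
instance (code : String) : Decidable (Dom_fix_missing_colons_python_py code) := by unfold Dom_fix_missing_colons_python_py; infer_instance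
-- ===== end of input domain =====

-- B replaces A's split-into-lines + per-line nested keyword scan + accumulate/join by a single
-- character-level streaming pass with an explicit line buffer flushed at each newline; at a flush
-- the decision is one first-token extraction plus one set-membership test (objective: alternative).

-- ===== PORT A =====
def pvKeywords : List (List Char) :=
  ["def".toList, "class".toList, "if".toList, "elif".toList, "else".toList, "for".toList,
   "while".toList, "try".toList, "except".toList, "finally".toList, "with".toList]

-- the inner 'for keyword in keywords' loop of A (break on the first keyword needing a colon)
def pvNeedsColon (stripped : List Char) : List (List Char) → Bool
  | [] => false
  | kw :: rest =>
    if PySem.Chars.startswith stripped (kw ++ [' ']) || stripped == kw then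
      if !PySem.Chars.endswith stripped [':'] then true
      else pvNeedsColon stripped rest
    else pvNeedsColon stripped rest

def fix_missing_colons_python_py (code : String) : String :=
  let lines := PySem.Chars.splitOn code.toList ['\n']
  let fixed_lines := lines.foldl (fun acc line =>
    let stripped := PySem.Chars.strip line
    let needs_colon := pvNeedsColon stripped pvKeywords
    if needs_colon then acc ++ [line ++ [':']] else acc ++ [line]) []
  String.ofList (PySem.Chars.join ['\n'] fixed_lines)

-- ===== PORT B =====
-- the keyword set, built once (Python: the set literal _KEYWORDS)
def pvKeywordSet : PySem.Set (List Char) := PySem.Set.ofList pvKeywords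

-- Python _flush(buf): stripped.split(' ')[0] is the longest prefix of non-space chars (exact
-- for the single-character separator ' ')
def pvFlush (buf : List Char) : List Char :=
  let stripped := PySem.Chars.strip buf
  if decide (stripped.takeWhile (fun c => c != ' ') ∈ pvKeywordSet)
      && !PySem.Chars.endswith stripped [':'] then buf ++ [':']
  else buf

-- the 'for ch in code' loop: out is the accumulated output, buf the current line buffer
def pvStream : List Char → List Char → List Char → List Char
  | [], out, buf => out ++ pvFlush buf
  | c :: rest, out, buf =>
    if c = '\n' then pvStream rest (out ++ pvFlush buf ++ ['\n']) []
    else pvStream rest out (buf ++ [c])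

def fix_missing_colons_python_py_alt (code : String) : String :=
  String.ofList (pvStream code.toList [] [])

-- ===== PRECONDITION & SPEC =====
def Spec_fix_missing_colons_python_py (code : String) (out : String) : Prop := out = fix_missing_colons_python_py_alt code
instance (code : String) (out : String) : Decidable (Spec_fix_missing_colons_python_py code out) := by unfold Spec_fix_missing_colons_python_py; infer_instance

-- ===== CLAIM (what is proved, stated in full; the proofs are below) =====
def Claim_equal_fix_missing_colons_python_py : Prop := ∀ (code : String), Dom_fix_missing_colons_python_py code → Spec_fix_missing_colons_python_py code (fix_missing_colons_python_py code)

-- ===== LEMMAS AND PROOFS =====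

-- pure characterisation of splitting on '\n' (proof helper)
def pvSplit : List Char → List (List Char)
  | [] => [[]]
  | c :: rest =>
    if c = '\n' then [] :: pvSplit rest
    else (c :: (pvSplit rest).headI) :: (pvSplit rest).tail

theorem pvSplit_ne_nil (s : List Char) : pvSplit s ≠ [] := by
  cases s with
  | nil => simp [pvSplit]
  | cons c rest =>
    by_cases h : c = '\n' <;> simp [pvSplit, h]

theorem pv_splitOn_go (fuel : Nat) :
    ∀ (l cur : List Char) (acc : List (List Char)), l.length ≤ fuel →
    PySem.Chars.splitOn.go ['\n'] fuel l cur acc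
      = acc.reverse ++ (cur.reverse ++ (pvSplit l).headI) :: (pvSplit l).tail := by
  induction fuel with
  | zero =>
    intro l cur acc h
    have : l = [] := List.eq_nil_of_length_eq_zero (Nat.le_zero.mp h)
    subst this
    simp [PySem.Chars.splitOn.go, pvSplit]
  | succ fuel ih =>
    intro l cur acc h
    cases l with
    | nil => simp [PySem.Chars.splitOn.go, pvSplit]
    | cons c rest =>
      simp only [List.length_cons, Nat.succ_le_succ_iff] at h
      by_cases hc : c = '\n'
      · subst hc
        rw [PySem.Chars.splitOn.go]
        simp only [List.isPrefixOf, beq_self_eq_true, Bool.true_and, if_true, List.length_singleton, List.drop_one, List.tail_cons]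
        rw [ih rest [] _ h]
        have hne := pvSplit_ne_nil rest
        simp [pvSplit, List.reverse_cons, List.headI_cons]
        cases hs : pvSplit rest with
        | nil => exact absurd hs hne
        | cons a t => simp
      · rw [PySem.Chars.splitOn.go]
        have hp : List.isPrefixOf ['\n'] (c :: rest) = false := by
          simp [List.isPrefixOf]
          exact fun hcc => absurd hcc.symm hc
        simp only [hp, Bool.false_eq_true, if_false]
        rw [ih rest (c :: cur) acc h]
        simp [pvSplit, hc]

theorem pv_splitOn_eq (s : List Char) :
    PySem.Chars.splitOn s ['\n'] = pvSplit s := by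
  unfold PySem.Chars.splitOn
  rw [pv_splitOn_go (s.length + 1) s [] [] (by omega)]
  simp
  cases hs : pvSplit s with
  | nil => exact absurd hs (pvSplit_ne_nil s)
  | cons a t => simp

-- A's per-keyword test matches exactly when the first space-delimited token is the keyword
-- (for a keyword containing no space).
theorem pv_match_iff (s kw : List Char) (h : ' ' ∉ kw) :
    ((kw ++ [' ']) <+: s ∨ s = kw) ↔ s.takeWhile (fun c => c != ' ') = kw := by
  constructor
  · rintro (⟨t, rfl⟩ | rfl)
    · have hkw : kw.takeWhile (fun c => c != ' ') = kw := by
        rw [List.takeWhile_eq_self_iff]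
        intro c hc
        simp only [bne_iff_ne, ne_eq]
        exact fun hcs => h (hcs ▸ hc)
      rw [List.append_assoc, List.singleton_append, List.takeWhile_append]
      rw [hkw]
      simp
    · rw [List.takeWhile_eq_self_iff]
      intro c hc
      simp only [bne_iff_ne, ne_eq]
      exact fun hcs => h (hcs ▸ hc)
  · intro ht
    rcases hd : s.dropWhile (fun c => c != ' ') with _ | ⟨c, t⟩
    · right
      have := List.takeWhile_append_dropWhile (p := fun c => c != ' ') (l := s)
      rw [ht, hd, List.append_nil] at this
      exact this.symm
    · left
      have hc : c = ' ' := by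
        have := List.head_dropWhile_not (fun c => c != ' ') (l := s) (by rw [hd]; simp)
        simp only [hd, List.head_cons] at this
        simpa using this
      refine ⟨t, ?_⟩
      have := List.takeWhile_append_dropWhile (p := fun c => c != ' ') (l := s)
      rw [ht, hd, hc] at this
      rw [← this]
      simp

-- A's keyword loop computed by B's single first-token membership test.
theorem pv_needs_eq (s : List Char) (kws : List (List Char)) (h : ∀ kw ∈ kws, ' ' ∉ kw) :
    pvNeedsColon s kws
      = (decide (s.takeWhile (fun c => c != ' ') ∈ kws) && !PySem.Chars.endswith s [':']) := by
  induction kws with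
  | nil => simp [pvNeedsColon]
  | cons kw rest ih =>
    have hkw : ' ' ∉ kw := h kw (List.mem_cons_self)
    have hrest : ∀ k ∈ rest, ' ' ∉ k := fun k hk => h k (List.mem_cons_of_mem _ hk)
    by_cases hm : s.takeWhile (fun c => c != ' ') = kw
    · have hc : (PySem.Chars.startswith s (kw ++ [' ']) || s == kw) = true := by
        rw [Bool.or_eq_true, PySem.Chars.startswith_iff, beq_iff_eq]
        exact (pv_match_iff s kw hkw).2 hm
      rw [pvNeedsColon, hc]
      simp only [if_true]
      cases he : PySem.Chars.endswith s [':'] with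
      | false => simp [hm]
      | true => simp [he, ih hrest]
    · have hc : (PySem.Chars.startswith s (kw ++ [' ']) || s == kw) = false := by
        rw [Bool.eq_false_iff]
        intro hcontra
        rw [Bool.or_eq_true, PySem.Chars.startswith_iff, beq_iff_eq] at hcontra
        exact hm ((pv_match_iff s kw hkw).1 hcontra)
      rw [pvNeedsColon, hc]
      simp only [Bool.false_eq_true, if_false]
      rw [ih hrest]
      simp [List.mem_cons, hm]

-- A's per-line body equals B's flush.
theorem pv_line_eq (line : List Char) :
    (if pvNeedsColon (PySem.Chars.strip line) pvKeywords then line ++ [':'] else line)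
      = pvFlush line := by
  have hkws : ∀ kw ∈ pvKeywords, ' ' ∉ kw := by decide
  unfold pvFlush
  rw [pv_needs_eq _ _ hkws]
  simp only [pvKeywordSet, PySem.Set.mem_ofList]

-- the streaming pass equals flushing each split piece and joining with '\n'
theorem pv_stream_eq (s : List Char) : ∀ (out buf : List Char),
    pvStream s out buf
      = out ++ PySem.Chars.join ['\n']
          (((buf ++ (pvSplit s).headI) :: (pvSplit s).tail).map pvFlush) := by
  induction s with
  | nil =>
    intro out buf
    simp [pvStream, pvSplit, PySem.Chars.join, List.intercalate]
  | cons c rest ih =>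
    intro out buf
    by_cases hc : c = '\n'
    · subst hc
      rw [pvStream]
      simp only [if_true]
      rw [ih]
      have hne := pvSplit_ne_nil rest
      cases hs : pvSplit rest with
      | nil => exact absurd hs hne
      | cons a t =>
        simp only [pvSplit, if_true, hs, List.headI_cons, List.tail_cons, List.append_nil,
          List.map_cons]
        rw [PySem.Chars.join_cons_cons]
        simp
    · rw [pvStream]
      simp only [hc, if_false]
      rw [ih]
      simp [pvSplit, hc]

-- ===== VERDICT (by name: the statement is the Claim_ definition above) =====
theorem fix_missing_colons_python_py_spec : Claim_equal_fix_missing_colons_python_py := by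
  intro code _
  unfold Spec_fix_missing_colons_python_py fix_missing_colons_python_py fix_missing_colons_python_py_alt
  simp only []
  congr 1
  rw [pv_stream_eq code.toList [] []]
  have hf : (fun (acc : List (List Char)) line =>
        if pvNeedsColon (PySem.Chars.strip line) pvKeywords then acc ++ [line ++ [':']]
        else acc ++ [line])
      = fun acc line => acc ++ [pvFlush line] := by
    funext acc line
    rw [← pv_line_eq line]
    by_cases h : pvNeedsColon (PySem.Chars.strip line) pvKeywords <;> simp [h]
  rw [hf, PySem.List.foldl_append_singleton_eq_map, pv_splitOn_eq]
  have hne := pvSplit_ne_nil code.toList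
  cases hs : pvSplit code.toList with
  | nil => exact absurd hs hne
  | cons a t => simp
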